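-- pv_equiv track=rewrite | github.com/tariq-hasan/leetcode | coding_patterns/07-graphs/03-union-find-disjoint-set-union/medium_947_most_stones_removed_with_same_row_or_column.py | removeStonesDFS
-- ===== SOURCE A (Python) =====
-- def removeStonesDFS(stones):
--     """
--     Build graph and use DFS to count connected components.
--
--     Time: O(n²) - for building adjacency list and DFS
--     Space: O(n²) - for adjacency list in worst case
--     """
--     n = len(stones)
--     graph = [[] for _ in range(n)]
--
--     # Build adjacency list
--     for i in range(n):
--         for j in range(i + 1, n):
--             if stones[i][0] == stones[j][0] or stones[i][1] == stones[j][1]: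
--                 graph[i].append(j)
--                 graph[j].append(i)
--
--     visited = [False] * n
--     components = 0
--
--     def dfs(node):
--         visited[node] = True
--         for neighbor in graph[node]:
--             if not visited[neighbor]:
--                 dfs(neighbor)
--
--     # Count connected components
--     for i in range(n):
--         if not visited[i]:
--             dfs(i)
--             components += 1
--
--     return n - components
-- ===== SOURCE B (Python) =====
-- def removeStonesDFS(stones):
--     """Min-label propagation: give every stone the smallest stone index in its
--     row/column-connected group by repeated sweeps until stable, then count
--     distinct labels (= connected components)."""
--     n = len(stones)
--     labels = list(range(n))
--     while True:
--         new = []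
--         for i in range(n):
--             m = labels[i]
--             for j in range(n):
--                 if j != i and (stones[i][0] == stones[j][0] or stones[i][1] == stones[j][1]):
--                     if labels[j] < m:
--                         m = labels[j]
--             new.append(m)
--         if new == labels:
--             break
--         labels = new
--     return n - len(set(labels))
-- ===== Notes on version B (the rewrite author's own statement) =====
-- stated objective: alternative
-- what changed: Replaced A's adjacency-list construction plus recursive DFS component counting with an iterative min-label propagation: every stone repeatedly adopts the smallest label among stones sharing its row or column until the labelling is stable, and the answer is n minus the number of distinct labels.
import Mathlib
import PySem

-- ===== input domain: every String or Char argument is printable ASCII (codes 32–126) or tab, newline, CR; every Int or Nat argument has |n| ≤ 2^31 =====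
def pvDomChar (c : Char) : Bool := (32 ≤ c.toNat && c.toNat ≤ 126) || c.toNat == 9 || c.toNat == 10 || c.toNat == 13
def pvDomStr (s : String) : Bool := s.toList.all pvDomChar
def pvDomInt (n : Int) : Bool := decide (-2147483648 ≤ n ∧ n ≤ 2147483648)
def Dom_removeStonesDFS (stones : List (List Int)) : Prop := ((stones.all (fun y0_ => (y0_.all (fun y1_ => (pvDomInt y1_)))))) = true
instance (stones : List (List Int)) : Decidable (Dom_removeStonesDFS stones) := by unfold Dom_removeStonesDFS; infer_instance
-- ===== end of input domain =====

-- B replaces A's adjacency-list + recursive-DFS component count by an iterative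
-- min-label propagation to a fixpoint (alternative algorithm, similar cost).


-- ===== PORT A =====
-- A-side helper: build the adjacency list (nested i < j loops, append both ways).
def pvBuildGraph (stones : List (List Int)) : List (List Nat) :=
  let n := stones.length
  (List.range n).foldl (fun g i =>
    (List.range' (i + 1) (n - (i + 1))).foldl (fun g j =>
      if ((stones.getD i []).getD 0 0 == (stones.getD j []).getD 0 0) ||
         ((stones.getD i []).getD 1 0 == (stones.getD j []).getD 1 0) then
        let g := g.set i (g.getD i [] ++ [j])
        g.set j (g.getD j [] ++ [i])
      else g) g)
    (List.replicate n [])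

-- A-side helper: the recursive dfs (fuel makes the same recursion total; inside
-- Pre_ the fuel passed by removeStonesDFS is never exhausted).
def pvDfsA (graph : List (List Nat)) : Nat → List Bool → Nat → List Bool
  | 0, visited, _ => visited
  | fuel + 1, visited, node =>
    (graph.getD node []).foldl
      (fun v nb => if v.getD nb false then v else pvDfsA graph fuel v nb)
      (visited.set node true)

def removeStonesDFS (stones : List (List Int)) : Int :=
  let n := stones.length
  let graph := pvBuildGraph stones
  let res := (List.range n).foldl
    (fun (st : List Bool × Nat) i =>
      if st.1.getD i false then st else (pvDfsA graph n st.1 i, st.2 + 1))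
    (List.replicate n false, 0)
  (n : Int) - res.2

-- ===== PORT B =====
-- B-side helper: one propagation sweep (new[i] = min label among i and the
-- stones sharing i's row or column).
def pvStepB (stones : List (List Int)) (labels : List Nat) : List Nat :=
  let n := stones.length
  (List.range n).map (fun i =>
    (List.range n).foldl (fun m j =>
      if (j != i) &&
         (((stones.getD i []).getD 0 0 == (stones.getD j []).getD 0 0) ||
          ((stones.getD i []).getD 1 0 == (stones.getD j []).getD 1 0)) then
        (if labels.getD j 0 < m then labels.getD j 0 else m)
      else m)
      (labels.getD i 0))

-- B-side helper: sweep until unchanged (fuel makes the while-loop total; n*n+1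
-- sweeps always reach the fixpoint since the label sum strictly decreases).
def pvLoopB (stones : List (List Int)) : Nat → List Nat → List Nat
  | 0, labels => labels
  | fuel + 1, labels =>
    let new := pvStepB stones labels
    if new = labels then labels else pvLoopB stones fuel new

def removeStonesDFS_alt (stones : List (List Int)) : Int :=
  let n := stones.length
  let labels := pvLoopB stones (n * n + 1) (List.range n)
  (n : Int) - (PySem.Set.ofList labels).length

-- ===== PRECONDITION & SPEC =====
-- Pre_ excludes exactly the inputs on which Python A raises IndexError: some
-- compared stone is missing the coordinate the short-circuiting condition reads.
def Pre_removeStonesDFS (stones : List (List Int)) : Prop :=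
  ∀ i < stones.length, ∀ j < stones.length, i < j →
    1 ≤ (stones.getD i []).length ∧ 1 ≤ (stones.getD j []).length ∧
    ((stones.getD i []).getD 0 0 = (stones.getD j []).getD 0 0 ∨
     (2 ≤ (stones.getD i []).length ∧ 2 ≤ (stones.getD j []).length))
instance (stones : List (List Int)) : Decidable (Pre_removeStonesDFS stones) := by
  unfold Pre_removeStonesDFS; infer_instance

def pvWitness_removeStonesDFS : List (List Int) := [[0, 0], [0, 1], [2, 2]]

def Spec_removeStonesDFS (stones : List (List Int)) (out : Int) : Prop := out = removeStonesDFS_alt stones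
instance (stones : List (List Int)) (out : Int) : Decidable (Spec_removeStonesDFS stones out) := by unfold Spec_removeStonesDFS; infer_instance

-- ===== CLAIM (what is proved, stated in full; the proofs are below) =====
def Claim_equal_removeStonesDFS : Prop := ∀ (stones : List (List Int)), Dom_removeStonesDFS stones → Pre_removeStonesDFS stones → Spec_removeStonesDFS stones (removeStonesDFS stones)

-- ===== LEMMAS AND PROOFS =====

-- The shared row/column relation both programs test, and reachability.
def pvShare (stones : List (List Int)) (i j : Nat) : Prop :=
  (stones.getD i []).getD 0 0 = (stones.getD j []).getD 0 0 ∨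
  (stones.getD i []).getD 1 0 = (stones.getD j []).getD 1 0

def pvAdj (stones : List (List Int)) (i j : Nat) : Prop :=
  i < stones.length ∧ j < stones.length ∧ i ≠ j ∧ pvShare stones i j

def pvReach (stones : List (List Int)) : Nat → Nat → Prop :=
  Relation.ReflTransGen (pvAdj stones)

def pvIsMin (stones : List (List Int)) (k : Nat) : Prop :=
  ∀ j, pvReach stones j k → k ≤ j

noncomputable def pvMinCount (stones : List (List Int)) : Nat → Nat
  | 0 => 0
  | k + 1 => pvMinCount stones k +
      (@ite _ (pvIsMin stones k) (Classical.propDecidable _) 1 0)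

-- graph characterization development
def pvGStep (stones : List (List Int)) (g : List (List Nat)) (q : Nat × Nat) : List (List Nat) :=
  if ((stones.getD q.1 []).getD 0 0 == (stones.getD q.2 []).getD 0 0) ||
     ((stones.getD q.1 []).getD 1 0 == (stones.getD q.2 []).getD 1 0) then
    let g := g.set q.1 (g.getD q.1 [] ++ [q.2])
    g.set q.2 (g.getD q.2 [] ++ [q.1])
  else g

def pvPairs (n : Nat) : List (Nat × Nat) :=
  (List.range n).flatMap (fun i => (List.range' (i + 1) (n - (i + 1))).map (fun j => (i, j)))

theorem pvBuild_eq_pairs (stones : List (List Int)) :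
    pvBuildGraph stones =
      (pvPairs stones.length).foldl (pvGStep stones) (List.replicate stones.length []) := by
  unfold pvBuildGraph pvPairs pvGStep
  rw [List.foldl_flatMap]
  simp [List.foldl_map]

theorem mem_pvPairs (n i j : Nat) : (i, j) ∈ pvPairs n ↔ i < j ∧ j < n := by
  unfold pvPairs
  simp only [List.mem_flatMap, List.mem_map, List.mem_range, List.mem_range'_1, Prod.mk.injEq]
  constructor
  · rintro ⟨a, ha, b, hb, rfl, rfl⟩; omega
  · rintro ⟨h1, h2⟩; exact ⟨i, by omega, j, by omega, rfl, rfl⟩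

theorem pvGetD_set_self {α : Type} (l : List α) (i : Nat) (v d : α) (h : i < l.length) :
    (l.set i v).getD i d = v := by simp [List.getD, h]
theorem pvGetD_set_ne {α : Type} (l : List α) (i x : Nat) (v d : α) (h : x ≠ i) :
    (l.set i v).getD x d = l.getD x d := by
  simp [List.getD, List.getElem?_set_ne (Ne.symm h)]


theorem pvGFold_mem (stones : List (List Int)) :
    ∀ (p : List (Nat × Nat)) (g : List (List Nat)),
      (∀ q ∈ p, q.1 < g.length ∧ q.2 < g.length ∧ q.1 ≠ q.2) →
      ∀ x y, y ∈ (p.foldl (pvGStep stones) g).getD x [] ↔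
        y ∈ g.getD x [] ∨ ∃ q ∈ p, pvShare stones q.1 q.2 ∧
          ((x = q.1 ∧ y = q.2) ∨ (x = q.2 ∧ y = q.1)) := by
  intro p
  induction p with
  | nil => intro g _ x y; simp
  | cons q p ih =>
    intro g hb x y
    obtain ⟨h1, h2, h3⟩ := hb q (List.mem_cons_self ..)
    rw [List.foldl_cons]
    have hlen : (pvGStep stones g q).length = g.length := by
      unfold pvGStep; split <;> simp
    rw [ih _ (fun r hr => hlen ▸ hb r (List.mem_cons_of_mem _ hr)) x y]
    unfold pvGStep
    by_cases hs : pvShare stones q.1 q.2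
    · rw [if_pos (by simp [pvShare] at hs ⊢; tauto)]
      constructor
      · rintro (hy | hrest)
        · -- y in doubly-set g at x
          by_cases hx2 : x = q.2
          · subst hx2
            rw [pvGetD_set_self _ _ _ [] (by simpa using h2)] at hy
            rcases List.mem_append.1 hy with hy | hy
            · rw [pvGetD_set_ne _ _ _ _ [] (Ne.symm h3)] at hy
              exact Or.inl hy
            · simp at hy; exact Or.inr ⟨q, List.mem_cons_self .., hs, Or.inr ⟨rfl, hy⟩⟩
          · rw [pvGetD_set_ne _ _ _ _ [] hx2] at hy
            by_cases hx1 : x = q.1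
            · subst hx1
              rw [pvGetD_set_self _ _ _ [] h1] at hy
              rcases List.mem_append.1 hy with hy | hy
              · exact Or.inl hy
              · simp at hy; exact Or.inr ⟨q, List.mem_cons_self .., hs, Or.inl ⟨rfl, hy⟩⟩
            · rw [pvGetD_set_ne _ _ _ _ [] hx1] at hy
              exact Or.inl hy
        · rcases hrest with ⟨r, hr, hsh, hxy⟩
          exact Or.inr ⟨r, List.mem_cons_of_mem _ hr, hsh, hxy⟩
      · -- backward
        intro h
        rcases h with hy | ⟨r, hr, hsh, hxy⟩
        · left
          by_cases hx2 : x = q.2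
          · subst hx2
            rw [pvGetD_set_self _ _ _ [] (by simpa using h2),
                pvGetD_set_ne _ _ _ _ [] (Ne.symm h3)]
            exact List.mem_append_left _ hy
          · rw [pvGetD_set_ne _ _ _ _ [] hx2]
            by_cases hx1 : x = q.1
            · subst hx1
              rw [pvGetD_set_self _ _ _ [] h1]
              exact List.mem_append_left _ hy
            · rw [pvGetD_set_ne _ _ _ _ [] hx1]; exact hy
        · rcases List.mem_cons.1 hr with rfl | hr
          · left
            rcases hxy with ⟨rfl, rfl⟩ | ⟨rfl, rfl⟩
            · rw [pvGetD_set_ne _ _ _ _ [] h3, pvGetD_set_self _ _ _ [] h1]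
              exact List.mem_append_right _ (by simp)
            · rw [pvGetD_set_self _ _ _ [] (by simpa using h2)]
              exact List.mem_append_right _ (by simp)
          · exact Or.inr ⟨r, hr, hsh, hxy⟩
    · rw [if_neg (by simp [pvShare] at hs ⊢; tauto)]
      constructor
      · rintro (hy | ⟨r, hr, hsh, hxy⟩)
        · exact Or.inl hy
        · exact Or.inr ⟨r, List.mem_cons_of_mem _ hr, hsh, hxy⟩
      · rintro (hy | ⟨r, hr, hsh, hxy⟩)
        · exact Or.inl hy
        · rcases List.mem_cons.1 hr with rfl | hr
          · exact absurd hsh hs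
          · exact Or.inr ⟨r, hr, hsh, hxy⟩

theorem pvShare_symm (stones : List (List Int)) {i j : Nat}
    (h : pvShare stones i j) : pvShare stones j i := by
  unfold pvShare at *; rcases h with h | h <;> [exact Or.inl h.symm; exact Or.inr h.symm]

theorem pvAdj_symm' (stones : List (List Int)) {i j : Nat}
    (h : pvAdj stones i j) : pvAdj stones j i := by
  obtain ⟨h1, h2, h3, h4⟩ := h
  exact ⟨h2, h1, Ne.symm h3, pvShare_symm stones h4⟩

theorem pvBuildGraph_mem' (stones : List (List Int)) (x y : Nat) :
    y ∈ (pvBuildGraph stones).getD x [] ↔ pvAdj stones x y := by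
  rw [pvBuild_eq_pairs, pvGFold_mem]
  · have hrep : ∀ z : Nat, (List.replicate stones.length ([]:List Nat)).getD z [] = [] := by
      intro z
      rcases Nat.lt_or_ge z stones.length with h | h
      · simp [List.getD, h]
      · simp [List.getD, h]
    rw [hrep]
    simp only [List.not_mem_nil, false_or]
    constructor
    · rintro ⟨q, hq, hsh, (⟨rfl, rfl⟩ | ⟨rfl, rfl⟩)⟩
      · obtain ⟨h1, h2⟩ := (mem_pvPairs ..).1 (by exact hq)
        exact ⟨by omega, by omega, by omega, hsh⟩
      · obtain ⟨h1, h2⟩ := (mem_pvPairs ..).1 (by exact hq)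
        exact ⟨by omega, by omega, by omega, pvShare_symm stones hsh⟩
    · rintro ⟨h1, h2, h3, h4⟩
      rcases Nat.lt_or_ge x y with hlt | hge
      · exact ⟨(x, y), (mem_pvPairs ..).2 ⟨hlt, h2⟩, h4, Or.inl ⟨rfl, rfl⟩⟩
      · have hlt : y < x := by omega
        exact ⟨(y, x), (mem_pvPairs ..).2 ⟨hlt, h1⟩, pvShare_symm stones h4, Or.inr ⟨rfl, rfl⟩⟩
  · intro q hq
    obtain ⟨h1, h2⟩ := (mem_pvPairs ..).1 hq
    simp only [List.length_replicate]
    exact ⟨by omega, by omega, by omega⟩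

-- ===== B-side =====

-- value/condition views of B's inner fold
theorem pvStepB_getD (stones : List (List Int)) (labels : List Nat) {i : Nat}
    (hi : i < stones.length) :
    (pvStepB stones labels).getD i 0 =
      (List.range stones.length).foldl (fun m j =>
        if (j != i) &&
           (((stones.getD i []).getD 0 0 == (stones.getD j []).getD 0 0) ||
            ((stones.getD i []).getD 1 0 == (stones.getD j []).getD 1 0)) then
          (if labels.getD j 0 < m then labels.getD j 0 else m)
        else m) (labels.getD i 0) := by
  unfold pvStepB
  rw [List.getD_eq_getElem _ _ (by simpa using hi)]
  simp

theorem pvStepB_length (stones : List (List Int)) (labels : List Nat) :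
    (pvStepB stones labels).length = stones.length := by
  unfold pvStepB; simp

-- characterize the inner fold
theorem pvFoldMin_spec (stones : List (List Int)) (labels : List Nat) (i : Nat) :
    ∀ (l : List Nat) (m0 : Nat),
      (let r := l.foldl (fun m j =>
         if (j != i) &&
            (((stones.getD i []).getD 0 0 == (stones.getD j []).getD 0 0) ||
             ((stones.getD i []).getD 1 0 == (stones.getD j []).getD 1 0)) then
           (if labels.getD j 0 < m then labels.getD j 0 else m)
         else m) m0;
       (r = m0 ∨ ∃ j ∈ l, j ≠ i ∧ pvShare stones i j ∧ r = labels.getD j 0) ∧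
       r ≤ m0 ∧
       ∀ j ∈ l, j ≠ i → pvShare stones i j → r ≤ labels.getD j 0) := by
  intro l
  induction l with
  | nil => intro m0; exact ⟨Or.inl rfl, Nat.le_refl _, by simp⟩
  | cons a l ih =>
    intro m0
    rw [List.foldl_cons]
    by_cases hc : a ≠ i ∧ pvShare stones i a
    · rw [if_pos (by simp [pvShare] at hc ⊢; tauto)]
      by_cases hlt : labels.getD a 0 < m0
      · rw [if_pos hlt]
        obtain ⟨hval, hle, hall⟩ := ih (labels.getD a 0)
        refine ⟨?_, by omega, ?_⟩
        · rcases hval with h | ⟨j, hj, hji, hsh, hr⟩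
          · exact Or.inr ⟨a, List.mem_cons_self .., hc.1, hc.2, h⟩
          · exact Or.inr ⟨j, List.mem_cons_of_mem _ hj, hji, hsh, hr⟩
        · intro j hj hji hsh
          rcases List.mem_cons.1 hj with rfl | hj
          · exact hle
          · exact hall j hj hji hsh
      · rw [if_neg hlt]
        obtain ⟨hval, hle, hall⟩ := ih m0
        refine ⟨?_, hle, ?_⟩
        · rcases hval with h | ⟨j, hj, hji, hsh, hr⟩
          · exact Or.inl h
          · exact Or.inr ⟨j, List.mem_cons_of_mem _ hj, hji, hsh, hr⟩
        · intro j hj hji hsh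
          rcases List.mem_cons.1 hj with rfl | hj
          · omega
          · exact hall j hj hji hsh
    · rw [if_neg (by simp [pvShare] at hc ⊢; tauto)]
      obtain ⟨hval, hle, hall⟩ := ih m0
      refine ⟨?_, hle, ?_⟩
      · rcases hval with h | ⟨j, hj, hji, hsh, hr⟩
        · exact Or.inl h
        · exact Or.inr ⟨j, List.mem_cons_of_mem _ hj, hji, hsh, hr⟩
      · intro j hj hji hsh
        rcases List.mem_cons.1 hj with rfl | hj
        · exact absurd ⟨hji, hsh⟩ hc
        · exact hall j hj hji hsh

-- the Good invariant for label lists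
def pvGood (stones : List (List Int)) (labels : List Nat) : Prop :=
  labels.length = stones.length ∧
  ∀ i < stones.length, labels.getD i 0 ≤ i ∧ pvReach stones (labels.getD i 0) i

theorem pvStepB_good (stones : List (List Int)) (labels : List Nat)
    (hg : pvGood stones labels) : pvGood stones (pvStepB stones labels) := by
  refine ⟨pvStepB_length .., ?_⟩
  intro i hi
  rw [pvStepB_getD stones labels hi]
  obtain ⟨hval, hle, _⟩ := pvFoldMin_spec stones labels i (List.range stones.length) (labels.getD i 0)
  obtain ⟨hgl, hgi⟩ := hg
  constructor
  · exact Nat.le_trans hle (hgi i hi).1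
  · rcases hval with h | ⟨j, hj, hji, hsh, hr⟩
    · rw [h]; exact (hgi i hi).2
    · rw [hr]
      have hjn : j < stones.length := List.mem_range.1 hj
      exact Relation.ReflTransGen.tail (hgi j hjn).2 ⟨hjn, hi, hji, pvShare_symm stones hsh⟩

theorem pvStepB_le (stones : List (List Int)) (labels : List Nat) {i : Nat}
    (hi : i < stones.length) :
    (pvStepB stones labels).getD i 0 ≤ labels.getD i 0 := by
  rw [pvStepB_getD stones labels hi]
  exact (pvFoldMin_spec stones labels i (List.range stones.length) (labels.getD i 0)).2.1

-- pointwise-≤ lists with different sums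
theorem pvSum_lt (a b : List Nat) (hl : a.length = b.length)
    (hle : ∀ i < a.length, a.getD i 0 ≤ b.getD i 0) (hne : a ≠ b) :
    a.sum < b.sum := by
  induction a generalizing b with
  | nil => cases b with
    | nil => exact absurd rfl hne
    | cons x xs => simp at hl
  | cons x xs ih =>
    cases b with
    | nil => simp at hl
    | cons y ys =>
      have hx : x ≤ y := hle 0 (by simp)
      have hxs : ∀ i < xs.length, xs.getD i 0 ≤ ys.getD i 0 := by
        intro i hi
        have := hle (i + 1) (by simp; omega)
        simpa using this
      by_cases hxy : x = y
      · subst hxy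
        have hne' : xs ≠ ys := fun h => hne (by rw [h])
        have := ih ys (by simpa using hl) hxs hne'
        simp; omega
      · have h1 : x < y := by omega
        have h2 : xs.sum ≤ ys.sum := by
          by_cases h : xs = ys
          · rw [h]
          · exact Nat.le_of_lt (ih ys (by simpa using hl) hxs h)
        simp; omega

theorem pvLoopB_fix (stones : List (List Int)) :
    ∀ (fuel : Nat) (labels : List Nat), pvGood stones labels → labels.sum < fuel →
      pvGood stones (pvLoopB stones fuel labels) ∧
      pvStepB stones (pvLoopB stones fuel labels) = pvLoopB stones fuel labels := by
  intro fuel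
  induction fuel with
  | zero => intro labels _ h; omega
  | succ f ih =>
    intro labels hg hs
    unfold pvLoopB
    by_cases heq : pvStepB stones labels = labels
    · rw [if_pos heq]; exact ⟨hg, heq⟩
    · rw [if_neg heq]
      have hlt : (pvStepB stones labels).sum < labels.sum := by
        apply pvSum_lt
        · rw [pvStepB_length, hg.1]
        · intro i hi
          exact pvStepB_le stones labels (by rw [pvStepB_length] at hi; exact hi)
        · exact heq
      exact ih _ (pvStepB_good stones labels hg) (by omega)

theorem pvSum_range_le (n : Nat) : (List.range n).sum ≤ n * n := by
  induction n with
  | zero => simp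
  | succ m ih =>
    rw [List.range_succ, List.sum_append]
    simp
    nlinarith

-- initial labels are Good
theorem pvGood_range (stones : List (List Int)) : pvGood stones (List.range stones.length) := by
  refine ⟨by simp, ?_⟩
  intro i hi
  rw [List.getD_eq_getElem _ _ (by simpa using hi)]
  simp
  exact Relation.ReflTransGen.refl

-- consequences of being a Good fixpoint of pvStepB
theorem pvFix_le (stones : List (List Int)) (L : List Nat)
    (hfix : pvStepB stones L = L) {i j : Nat} (hadj : pvAdj stones i j) :
    L.getD i 0 ≤ L.getD j 0 := by
  obtain ⟨hi, hj, hij, hsh⟩ := hadj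
  have h1 : (pvStepB stones L).getD i 0 = L.getD i 0 := by rw [hfix]
  rw [pvStepB_getD stones L hi] at h1
  have := (pvFoldMin_spec stones L i (List.range stones.length) (L.getD i 0)).2.2
    j (List.mem_range.2 hj) (Ne.symm hij) hsh
  omega

theorem pvFix_adj_eq (stones : List (List Int)) (L : List Nat)
    (hfix : pvStepB stones L = L) {i j : Nat} (hadj : pvAdj stones i j) :
    L.getD i 0 = L.getD j 0 :=
  Nat.le_antisymm (pvFix_le stones L hfix hadj)
    (pvFix_le stones L hfix (pvAdj_symm' stones hadj))

theorem pvFix_reach_eq (stones : List (List Int)) (L : List Nat)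
    (hfix : pvStepB stones L = L) {i j : Nat} (h : pvReach stones i j) :
    L.getD i 0 = L.getD j 0 := by
  induction h with
  | refl => rfl
  | tail _ hadj ih => exact ih.trans (pvFix_adj_eq stones L hfix hadj)

theorem pvFix_isMin (stones : List (List Int)) (L : List Nat)
    (hg : pvGood stones L) (hfix : pvStepB stones L = L) {i : Nat}
    (hi : i < stones.length) : pvIsMin stones (L.getD i 0) := by
  intro j hj
  have hLi := (hg.2 i hi).2
  have hLL : L.getD (L.getD i 0) 0 = L.getD i 0 := pvFix_reach_eq stones L hfix hLi
  have hjL : L.getD j 0 = L.getD (L.getD i 0) 0 := pvFix_reach_eq stones L hfix hj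
  rcases Relation.ReflTransGen.cases_head hj with rfl | ⟨c, hadj, _⟩
  · exact Nat.le_refl _
  · have hjn : j < stones.length := hadj.1
    have := (hg.2 j hjn).1
    omega

theorem pvFix_min_self (stones : List (List Int)) (L : List Nat)
    (hg : pvGood stones L) {k : Nat} (hk : k < stones.length)
    (hmin : pvIsMin stones k) : L.getD k 0 = k := by
  have h1 := (hg.2 k hk).1
  have h2 := hmin _ (hg.2 k hk).2
  omega

theorem pvFix_mem (stones : List (List Int)) (L : List Nat)
    (hg : pvGood stones L) (hfix : pvStepB stones L = L) (x : Nat) :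
    x ∈ L ↔ x < stones.length ∧ pvIsMin stones x := by
  constructor
  · intro hx
    obtain ⟨i, hi, hix⟩ := List.mem_iff_getElem.1 hx
    have hin : i < stones.length := by rw [← hg.1]; exact hi
    have hgd : L.getD i 0 = x := by rw [List.getD_eq_getElem _ _ hi, hix]
    constructor
    · have := (hg.2 i hin).1; omega
    · rw [← hgd]; exact pvFix_isMin stones L hg hfix hin
  · rintro ⟨hx, hmin⟩
    have h := pvFix_min_self stones L hg hx hmin
    have hlen : x < L.length := by rw [hg.1]; exact hx
    have : L.getD x 0 = L[x] := List.getD_eq_getElem _ _ hlen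
    rw [this] at h
    exact h ▸ List.getElem_mem hlen

-- counting: the set of minima of range n
noncomputable def pvMinSet (stones : List (List Int)) (n : Nat) : Finset Nat :=
  @Finset.filter _ (fun k => pvIsMin stones k) (Classical.decPred _) (Finset.range n)

theorem mem_pvMinSet (stones : List (List Int)) (n x : Nat) :
    x ∈ pvMinSet stones n ↔ x < n ∧ pvIsMin stones x := by
  letI := Classical.decPred (pvIsMin stones)
  unfold pvMinSet
  rw [Finset.mem_filter, Finset.mem_range]

theorem card_pvMinSet (stones : List (List Int)) :
    ∀ n, (pvMinSet stones n).card = pvMinCount stones n := by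
  intro n
  induction n with
  | zero =>
    have : pvMinSet stones 0 = ∅ := by
      apply Finset.ext; intro x; simp [mem_pvMinSet]
    rw [this]; rfl
  | succ k ih =>
    by_cases h : pvIsMin stones k
    · have he : pvMinSet stones (k + 1) = insert k (pvMinSet stones k) := by
        apply Finset.ext; intro x
        rw [Finset.mem_insert, mem_pvMinSet, mem_pvMinSet]
        constructor
        · rintro ⟨hx, hm⟩
          rcases Nat.lt_or_ge x k with hlt | hge
          · exact Or.inr ⟨hlt, hm⟩
          · exact Or.inl (by omega)
        · rintro (rfl | ⟨hx, hm⟩)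
          · exact ⟨by omega, h⟩
          · exact ⟨by omega, hm⟩
      rw [he, Finset.card_insert_of_notMem (by rw [mem_pvMinSet]; omega), ih,
          pvMinCount, if_pos h]
    · have he : pvMinSet stones (k + 1) = pvMinSet stones k := by
        apply Finset.ext; intro x
        rw [mem_pvMinSet, mem_pvMinSet]
        constructor
        · rintro ⟨hx, hm⟩
          rcases Nat.lt_or_ge x k with hlt | hge
          · exact ⟨hlt, hm⟩
          · have hxk : x = k := by omega
            exact absurd (by rwa [hxk] at hm) h
        · rintro ⟨hx, hm⟩; exact ⟨by omega, hm⟩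
      rw [he, ih, pvMinCount, if_neg h]
      omega

theorem pvB_char' (stones : List (List Int)) :
    removeStonesDFS_alt stones =
      (stones.length : Int) - pvMinCount stones stones.length := by
  have hfix := pvLoopB_fix stones (stones.length * stones.length + 1)
    (List.range stones.length) (pvGood_range stones)
    (by have := pvSum_range_le stones.length; omega)
  set L := pvLoopB stones (stones.length * stones.length + 1) (List.range stones.length) with hL
  obtain ⟨hg, hf⟩ := hfix
  have hmem : ∀ x, x ∈ PySem.Set.ofList L ↔ x ∈ pvMinSet stones stones.length := by
    intro x
    rw [PySem.Set.mem_ofList, pvFix_mem stones L hg hf, mem_pvMinSet]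
  have hnd : (PySem.Set.ofList L).Nodup := PySem.Set.nodup_ofList L
  have hcard : (PySem.Set.ofList L).length = (pvMinSet stones stones.length).card := by
    rw [← List.toFinset_card_of_nodup hnd]
    congr 1
    apply Finset.ext; intro x
    rw [List.mem_toFinset, hmem]
  have hdef : removeStonesDFS_alt stones =
      (stones.length : Int) - ((PySem.Set.ofList L).length : Int) := rfl
  rw [hdef, hcard, card_pvMinSet]

-- ===== A-side: DFS correctness =====
theorem pvCount_false_set (v : List Bool) :
    ∀ (node : Nat), node < v.length → v.getD node false = false →
      (v.set node true).count false + 1 = v.count false := by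
  induction v with
  | nil => intro node h; simp at h
  | cons a tl ih =>
    intro node hn hg
    cases node with
    | zero =>
      simp [List.getD] at hg
      subst hg
      simp
    | succ m =>
      have h1 : m < tl.length := by simpa using hn
      have h2 : tl.getD m false = false := by simpa [List.getD] using hg
      have := ih m h1 h2
      simp only [List.set_cons_succ, List.count_cons]
      omega

theorem pvCount_false_mono (v : List Bool) :
    ∀ (w : List Bool), v.length = w.length →
      (∀ x, v.getD x false = true → w.getD x false = true) →
      w.count false ≤ v.count false := by
  induction v with
  | nil =>
    intro w hl _
    have hw : w = [] := List.eq_nil_of_length_eq_zero (by simpa using hl.symm)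
    subst hw; simp
  | cons a tl ih =>
    intro w hl hm
    cases w with
    | nil => simp at hl
    | cons b tw =>
      have htl : tw.count false ≤ tl.count false := by
        apply ih tw (by simpa using hl)
        intro x hx
        have := hm (x + 1) (by simpa [List.getD] using hx)
        simpa [List.getD] using this
      have hhead : a = true → b = true := by
        intro ha
        have := hm 0 (by simpa [List.getD] using ha)
        simpa [List.getD] using this
      simp only [List.count_cons]
      cases a <;> cases b <;> simp_all <;> omega

theorem pvDfsA_spec (stones : List (List Int)) :
    ∀ (fuel : Nat) (v : List Bool) (node : Nat),
      v.length = stones.length → node < stones.length →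
      v.getD node false = false → v.count false ≤ fuel →
      (pvDfsA (pvBuildGraph stones) fuel v node).length = stones.length ∧
      (∀ x, v.getD x false = true →
        (pvDfsA (pvBuildGraph stones) fuel v node).getD x false = true) ∧
      (pvDfsA (pvBuildGraph stones) fuel v node).getD node false = true ∧
      (∀ x, (pvDfsA (pvBuildGraph stones) fuel v node).getD x false = true →
        v.getD x false = true ∨ pvReach stones node x) ∧
      (∀ x, (pvDfsA (pvBuildGraph stones) fuel v node).getD x false = true →
        v.getD x false = false → ∀ y, pvAdj stones x y →
        (pvDfsA (pvBuildGraph stones) fuel v node).getD y false = true) := by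
  intro fuel
  induction fuel with
  | zero =>
    intro v node hl hn hun hc
    exfalso
    have hmem : false ∈ v := by
      have hlt : node < v.length := by omega
      have := List.getD_eq_getElem v false hlt
      rw [hun] at this
      exact this ▸ List.getElem_mem hlt
    have := List.count_pos_iff.mpr hmem
    omega
  | succ f ih =>
    intro v node hl hn hun hc
    set G := pvBuildGraph stones with hG
    set v' := v.set node true with hv'
    have hv'l : v'.length = stones.length := by rw [hv']; simpa using hl
    have hv'c : v'.count false + 1 = v.count false :=
      pvCount_false_set v node (by omega) hun
    have hv'get : ∀ x, v'.getD x false = true ↔ (x = node ∨ v.getD x false = true) := by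
      intro x
      by_cases hx : x = node
      · subst hx; rw [hv', pvGetD_set_self _ _ _ _ (by omega)]; simp
      · rw [hv', pvGetD_set_ne _ _ _ _ _ hx]; simp [hx]
    -- the inner fold over any sublist of node's neighbors
    have fold : ∀ (l : List Nat), (∀ nb ∈ l, pvAdj stones node nb) →
        ∀ (w : List Bool), w.length = stones.length →
          (∀ x, v'.getD x false = true → w.getD x false = true) →
          (∀ x, w.getD x false = true → v.getD x false = true ∨ pvReach stones node x) →
          (∀ x, w.getD x false = true → v.getD x false = false → x ≠ node →
            ∀ y, pvAdj stones x y → w.getD y false = true) →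
          (let r := l.foldl (fun vv nb => if vv.getD nb false then vv
                             else pvDfsA G f vv nb) w;
           r.length = stones.length ∧
           (∀ x, w.getD x false = true → r.getD x false = true) ∧
           (∀ x, r.getD x false = true → v.getD x false = true ∨ pvReach stones node x) ∧
           (∀ x, r.getD x false = true → v.getD x false = false → x ≠ node →
             ∀ y, pvAdj stones x y → r.getD y false = true) ∧
           (∀ nb ∈ l, r.getD nb false = true)) := by
      intro l
      induction l with
      | nil =>
        intro _ w hwl hwm hws hwc
        exact ⟨hwl, fun x hx => hx, hws, hwc, by simp⟩
      | cons nb l ihl =>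
        intro hmem w hwl hwm hws hwc
        have hadj : pvAdj stones node nb := hmem nb (List.mem_cons_self ..)
        rw [List.foldl_cons]
        by_cases hvis : w.getD nb false = true
        · rw [if_pos hvis]
          obtain ⟨r1, r2, r3, r4, r5⟩ := ihl (fun x hx => hmem x (List.mem_cons_of_mem _ hx)) w hwl hwm hws hwc
          exact ⟨r1, r2, r3, r4, fun x hx => by
            rcases List.mem_cons.1 hx with rfl | hx
            · exact r2 _ hvis
            · exact r5 x hx⟩
        · rw [if_neg hvis]
          have hvisf : w.getD nb false = false := by
            cases h : w.getD nb false
            · rfl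
            · exact absurd h hvis
          have hwc' : w.count false ≤ f := by
            have := pvCount_false_mono v' w (by omega) hwm
            omega
          obtain ⟨d1, d2, d3, d4, d5⟩ := ih w nb hwl hadj.2.1 hvisf hwc'
          set w2 := pvDfsA G f w nb with hw2
          have hreach_nb : pvReach stones node nb := Relation.ReflTransGen.single hadj
          have hw2m : ∀ x, v'.getD x false = true → w2.getD x false = true :=
            fun x hx => d2 x (hwm x hx)
          have hw2s : ∀ x, w2.getD x false = true →
              v.getD x false = true ∨ pvReach stones node x := by
            intro x hx
            rcases d4 x hx with hx' | hx'
            · exact hws x hx'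
            · exact Or.inr (Relation.ReflTransGen.trans hreach_nb hx')
          have hw2c : ∀ x, w2.getD x false = true → v.getD x false = false → x ≠ node →
              ∀ y, pvAdj stones x y → w2.getD y false = true := by
            intro x hx hvx hxn y hxy
            by_cases hwx : w.getD x false = true
            · exact d2 y (hwc x hwx hvx hxn y hxy)
            · have hwxf : w.getD x false = false := by
                cases h : w.getD x false
                · rfl
                · exact absurd h hwx
              exact d5 x hx hwxf y hxy
          obtain ⟨r1, r2, r3, r4, r5⟩ := ihl (fun x hx => hmem x (List.mem_cons_of_mem _ hx)) w2 d1 hw2m hw2s hw2c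
          refine ⟨r1, fun x hx => r2 x (d2 x hx), r3, r4, fun x hx => ?_⟩
          rcases List.mem_cons.1 hx with rfl | hx
          · exact r2 _ d3
          · exact r5 x hx
    -- assemble
    have hGnode : ∀ nb ∈ G.getD node [], pvAdj stones node nb := by
      intro nb hnb; exact (pvBuildGraph_mem' stones node nb).1 hnb
    obtain ⟨r1, r2, r3, r4, r5⟩ := fold (G.getD node []) hGnode v' hv'l (fun x hx => hx)
      (by
        intro x hx
        rcases (hv'get x).1 hx with rfl | hx'
        · exact Or.inr Relation.ReflTransGen.refl
        · exact Or.inl hx')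
      (by
        intro x hx hvx hxn y hxy
        rcases (hv'get x).1 hx with rfl | hx'
        · exact absurd rfl hxn
        · rw [hvx] at hx'; exact absurd hx' (by simp))
    have hdfs : pvDfsA G (f + 1) v node =
        (G.getD node []).foldl (fun vv nb => if vv.getD nb false then vv
          else pvDfsA G f vv nb) v' := rfl
    rw [hdfs]
    refine ⟨r1, ?_, ?_, r3, ?_⟩
    · intro x hx
      exact r2 x ((hv'get x).2 (Or.inr hx))
    · exact r2 node ((hv'get node).2 (Or.inl rfl))
    · intro x hx hvx y hxy
      by_cases hxn : x = node
      · subst hxn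
        exact r5 y ((pvBuildGraph_mem' stones x y).2 hxy)
      · exact r4 x hx hvx hxn y hxy

-- reachable nodes are all marked, when the pre-visited set is closed
theorem pvDfsA_reach (stones : List (List Int)) (fuel : Nat) (v : List Bool) (node : Nat)
    (hl : v.length = stones.length) (hn : node < stones.length)
    (hun : v.getD node false = false) (hc : v.count false ≤ fuel)
    (hclosed : ∀ x y, v.getD x false = true → pvAdj stones x y → v.getD y false = true) :
    ∀ x, pvReach stones node x →
      (pvDfsA (pvBuildGraph stones) fuel v node).getD x false = true := by
  obtain ⟨_, h2, h3, _, h5⟩ := pvDfsA_spec stones fuel v node hl hn hun hc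
  intro x hx
  induction hx with
  | refl => exact h3
  | tail hab hadj ihx =>
    rename_i b c
    by_cases hvb : v.getD b false = true
    · exact h2 _ (hclosed b c hvb hadj)
    · have hvbf : v.getD b false = false := by
        cases h : v.getD b false
        · rfl
        · exact absurd h hvb
      exact h5 b ihx hvbf c hadj

-- the outer component-counting loop
theorem pvA_loop (stones : List (List Int)) :
    ∀ k, k ≤ stones.length →
      (let st := (List.range k).foldl
        (fun (st : List Bool × Nat) i =>
          if st.1.getD i false then st
          else (pvDfsA (pvBuildGraph stones) stones.length st.1 i, st.2 + 1))
        (List.replicate stones.length false, 0);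
      st.1.length = stones.length ∧
      (∀ x, st.1.getD x false = true ↔ ∃ j < k, pvReach stones j x) ∧
      st.2 = pvMinCount stones k) := by
  intro k
  induction k with
  | zero =>
    intro _
    refine ⟨by simp, ?_, rfl⟩
    intro x
    simp only [List.range_zero, List.foldl_nil]
    constructor
    · intro hx
      exfalso
      by_cases hxl : x < stones.length
      · have := List.getD_eq_getElem (List.replicate stones.length false) false
          (by simpa using hxl)
        rw [this] at hx
        simp at hx
      · rw [List.getD_eq_default _ _ (by simpa using hxl)] at hx
        simp at hx
    · rintro ⟨j, hj, _⟩; omega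
  | succ k ihk =>
    intro hk
    obtain ⟨h1, h2, h3⟩ := ihk (by omega)
    rw [List.range_succ, List.foldl_append, List.foldl_cons, List.foldl_nil]
    set st := (List.range k).foldl
        (fun (st : List Bool × Nat) i =>
          if st.1.getD i false then st
          else (pvDfsA (pvBuildGraph stones) stones.length st.1 i, st.2 + 1))
        (List.replicate stones.length false, 0) with hst
    have hkn : k < stones.length := by omega
    by_cases hvk : st.1.getD k false = true
    · rw [if_pos hvk]
      obtain ⟨j, hj, hreach⟩ := (h2 k).1 hvk
      have hnotmin : ¬ pvIsMin stones k := by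
        intro hmin
        have := hmin j hreach
        omega
      refine ⟨h1, ?_, by rw [h3, pvMinCount, if_neg hnotmin]; omega⟩
      intro x
      rw [h2 x]
      constructor
      · rintro ⟨j', hj', hr⟩; exact ⟨j', by omega, hr⟩
      · rintro ⟨j', hj', hr⟩
        by_cases hjk : j' = k
        · subst hjk
          exact ⟨j, hj, Relation.ReflTransGen.trans hreach hr⟩
        · exact ⟨j', by omega, hr⟩
    · rw [if_neg hvk]
      have hvkf : st.1.getD k false = false := by
        cases h : st.1.getD k false
        · rfl
        · exact absurd h hvk
      have hmin : pvIsMin stones k := by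
        intro j hj
        by_contra hlt
        exact hvk ((h2 k).2 ⟨j, by omega, hj⟩)
      have hclosed : ∀ x y, st.1.getD x false = true → pvAdj stones x y →
          st.1.getD y false = true := by
        intro x y hx hxy
        obtain ⟨j, hj, hr⟩ := (h2 x).1 hx
        exact (h2 y).2 ⟨j, hj, Relation.ReflTransGen.tail hr hxy⟩
      have hcnt : st.1.count false ≤ stones.length := by
        have := List.count_le_length (l := st.1) (a := false)
        omega
      obtain ⟨d1, _, _, d4, _⟩ := pvDfsA_spec stones stones.length st.1 k h1 hkn hvkf hcnt
      have dreach := pvDfsA_reach stones stones.length st.1 k h1 hkn hvkf hcnt hclosed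
      refine ⟨d1, ?_, by simp only [h3, pvMinCount, if_pos hmin]⟩
      intro x
      constructor
      · intro hx
        rcases d4 x hx with hx' | hx'
        · obtain ⟨j, hj, hr⟩ := (h2 x).1 hx'
          exact ⟨j, by omega, hr⟩
        · exact ⟨k, by omega, hx'⟩
      · rintro ⟨j, hj, hr⟩
        by_cases hjk : j = k
        · subst hjk
          exact dreach x hr
        · obtain ⟨_, d2', _, _, _⟩ := pvDfsA_spec stones stones.length st.1 k h1 hkn hvkf hcnt
          exact d2' x ((h2 x).2 ⟨j, by omega, hr⟩)

theorem pvA_char' (stones : List (List Int)) :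
    removeStonesDFS stones =
      (stones.length : Int) - pvMinCount stones stones.length := by
  obtain ⟨_, _, h3⟩ := pvA_loop stones stones.length (Nat.le_refl _)
  have hdef : removeStonesDFS stones =
      (stones.length : Int) - (((List.range stones.length).foldl
        (fun (st : List Bool × Nat) i =>
          if st.1.getD i false then st
          else (pvDfsA (pvBuildGraph stones) stones.length st.1 i, st.2 + 1))
        (List.replicate stones.length false, 0)).2 : Int) := rfl
  rw [hdef, h3]

-- ===== VERDICT (by name: the statement is the Claim_ definition above) =====
theorem removeStonesDFS_spec : Claim_equal_removeStonesDFS := by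
  intro stones _ _
  unfold Spec_removeStonesDFS
  rw [pvA_char', pvB_char']
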